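/-
  GENERATED by c/gen_labels.py from the tables of the image toyh (FUNCTIONS LOOPS CHECKS insns sym; the PROGRAM only (the base is in the shared library))
  -- do not edit; re-run the script when the image is rebuilt.

  `Toyh.L.<function>.<label>`: a name for every code address of the image that a statement or a proof cites.
  Statements and proofs cite these names, never the numbers: a rebuild that only shifts code changes this file alone.
  Per function: entry, size (bytes), insns (instructions), cut<k> (the addresses the units table cites: segment
  entries, exits, cut points), loop<k> (loop heads), ret<k> (the return address of the k-th call), chk<k> (the call
  instruction of the k-th check site). One address may have several names.
-/
import X86.Derived.User.State
namespace Toyh.L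
open X86

abbrev prog_main.entry : Word := 0x105000  -- toyh.c:31 long prog_main(const unsigned char *in, long len, unsigned char *out, long cap, void *heap,…
abbrev prog_main.size : Nat := 89  -- bytes of code: 0x105000 .. 0x105059
abbrev prog_main.insns : Nat := 28  -- instructions
abbrev prog_main.ret1 : Word := 0x105021  -- after the call at 0x10501c of clamp_length | toyh.c:39 n = clamp_length(len);
abbrev prog_main.ret2 : Word := 0x10502c  -- after the call at 0x105027 of malloc | toyh.c:40 p = malloc((size_t) n);
abbrev prog_main.ret3 : Word := 0x105042  -- after the call at 0x10503d of memcpy | toyh.c:47 memcpy(p, in, (size_t) n);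
abbrev prog_main.ret4 : Word := 0x10504a  -- after the call at 0x105045 of free | toyh.c:49 free(p);

abbrev clamp_length.entry : Word := 0x1050e0  -- toyh.c:22 if (len < 0) {
abbrev clamp_length.size : Nat := 27  -- bytes of code: 0x1050e0 .. 0x1050fb
abbrev clamp_length.insns : Nat := 10  -- instructions

abbrev _sub_I_65535_1.entry : Word := 0x105180  -- toyh.c:55 }
abbrev _sub_I_65535_1.size : Nat := 24  -- bytes of code: 0x105180 .. 0x105198
abbrev _sub_I_65535_1.insns : Nat := 6  -- instructions
abbrev _sub_I_65535_1.ret1 : Word := 0x105193  -- after the call at 0x10518e of __asan_register_globals | toyh.c:55 }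

end Toyh.L

-- Sanity checks: a wrong generator fails the build here.
example : Toyh.L.prog_main.entry = 0x105000 := by decide
example : Toyh.L.prog_main.ret1 = 0x105021 := by decide
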